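-- pv_equiv track=rewrite | github.com/pypi-data/pypi-mirror-396 | packages/polar-python/polar_python-0.0.5-py3-none-any.whl/polar_python/parsers/compression.py | parse_delta_frame_ref_samples
-- ===== SOURCE A (Python) =====
-- import math
-- from typing import List
--
-- def parse_delta_frame_ref_samples(
--     data: List[int], channels: int, resolution: int, data_type: str
-- ) -> List[int]:
--     """Parse reference samples from delta frame data."""
--     samples = []
--     offset = 0
--     resolution_in_bytes = int(math.ceil(resolution / 8.0))
--
--     for _ in range(channels):
--         if offset + resolution_in_bytes > len(data):
--             break
--
--         if data_type == "signed_int":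
--             sample = int.from_bytes(
--                 data[offset : offset + resolution_in_bytes],
--                 byteorder="little",
--                 signed=True,
--             )
--         else:
--             sample = int.from_bytes(
--                 data[offset : offset + resolution_in_bytes],
--                 byteorder="little",
--                 signed=False,
--             )
--
--         offset += resolution_in_bytes
--         samples.append(sample)
--
--     return samples
-- ===== SOURCE B (Python) =====
-- import math
-- from typing import List
--
--
-- def parse_delta_frame_ref_samples(
--     data: List[int], channels: int, resolution: int, data_type: str
-- ) -> List[int]:
--     """Parse reference samples from delta frame data."""
--     rb = int(math.ceil(resolution / 8.0))
--     if rb <= 0: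
--         return []
--     count = max(0, min(channels, len(data) // rb))
--     if count == 0:
--         return []
--     # fold the whole consumed prefix into ONE big little-endian integer,
--     # then peel base-256**rb digits off it, sign-correcting each digit
--     big = int.from_bytes(data[: count * rb], byteorder="little")
--     base = 256 ** rb
--     half = base // 2
--     samples = []
--     for _ in range(count):
--         v = big % base
--         big //= base
--         if data_type == "signed_int" and v >= half:
--             v -= base
--         samples.append(v)
--     return samples
-- ===== Notes on version B (the rewrite author's own statement) =====
-- stated objective: alternative
-- what changed: B folds the whole consumed byte prefix into one big little-endian integer with a single int.from_bytes, then peels each sample off it as a base-256**rb digit by repeated divmod with per-digit sign correction, instead of A's offset loop slicing and converting one chunk per channel with a bounds-check-and-break; Pre_ excludes (a) inputs whose consumed byte prefix contains a value outside 0..255, on which both programs raise ValueError, and (b) non-positive resolution with positive channels, where A's zero/negative slice width yields accidental zero samples while B returns no samples.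
-- outside the precondition, e.g. on parse_delta_frame_ref_samples([], 3, 0, 'u'): A returns [0, 0, 0], B returns []; on parse_delta_frame_ref_samples([5, 6], 1, -8, 'u'): A returns [5], B returns []; on parse_delta_frame_ref_samples([300], 1, 8, 'u'): A raises ValueError, B raises ValueError
import Mathlib
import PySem

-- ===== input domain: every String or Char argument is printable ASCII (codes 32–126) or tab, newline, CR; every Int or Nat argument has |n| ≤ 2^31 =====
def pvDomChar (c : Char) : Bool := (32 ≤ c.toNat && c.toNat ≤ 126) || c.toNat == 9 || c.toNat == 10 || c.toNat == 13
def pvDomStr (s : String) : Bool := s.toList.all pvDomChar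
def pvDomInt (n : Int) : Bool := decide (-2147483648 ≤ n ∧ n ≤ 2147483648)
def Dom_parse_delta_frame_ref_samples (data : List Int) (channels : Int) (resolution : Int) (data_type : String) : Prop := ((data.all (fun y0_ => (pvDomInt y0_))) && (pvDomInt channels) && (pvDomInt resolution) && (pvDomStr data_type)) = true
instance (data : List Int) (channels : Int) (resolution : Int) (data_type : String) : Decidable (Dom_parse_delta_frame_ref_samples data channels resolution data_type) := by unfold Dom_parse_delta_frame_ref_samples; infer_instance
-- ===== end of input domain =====

-- B folds the whole consumed prefix into ONE big little-endian integer and then peels each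
-- sample off as a base-256^rb digit by repeated divmod, instead of A's per-channel
-- slice-and-convert loop (objective: alternative; return-value equivalence only).

-- ===== PORT A =====

-- int.from_bytes(chunk, byteorder="little", signed=s) for a list of bytes (0..255).
-- Exact on byte-valued chunks: unsigned value is the little-endian base-256 sum; the
-- signed reading subtracts 256^len when the top bit is set (2*u ≥ 256^len ↔ u ≥ 2^(8len-1)).
def pvFromBytesLE (chunk : List Int) (signed : Bool) : Int :=
  let u := chunk.foldr (fun b acc => b + 256 * acc) 0
  if signed && decide ((256:Int) ^ chunk.length ≤ 2 * u) then u - (256:Int) ^ chunk.length else u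

-- the body of A's 'for _ in range(channels)' loop: fuel = remaining iterations, offset as in A
def pvAloop (data : List Int) (rb : Int) (data_type : String) : Nat → Int → List Int
  | 0, _ => []
  | fuel + 1, offset =>
    if (data.length : Int) < offset + rb then []
    else
      (if data_type == "signed_int" then
        pvFromBytesLE (PySem.List.slice data (some offset) (some (offset + rb))) true
      else
        pvFromBytesLE (PySem.List.slice data (some offset) (some (offset + rb))) false)
      :: pvAloop data rb data_type fuel (offset + rb)

def parse_delta_frame_ref_samples (data : List Int) (channels : Int) (resolution : Int) (data_type : String) : List Int :=
  -- int(math.ceil(resolution / 8.0)) = ceiling division, exact for |resolution| ≤ 2^31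
  let resolution_in_bytes : Int := -(PySem.Int.floordiv (-resolution) 8)
  pvAloop data resolution_in_bytes data_type channels.toNat 0

-- ===== PORT B =====

-- int.from_bytes(prefix, byteorder="little") (unsigned): the little-endian base-256 fold
def pvBigLE (bs : List Int) : Int := bs.foldr (fun b acc => b + 256 * acc) 0

-- Source B's 'for _ in range(count)' peel loop: v = big % base; big //= base; sign-correct v
def pvBpeel (base half : Int) (signed : Bool) : Nat → Int → List Int
  | 0, _ => []
  | n + 1, big =>
    let v := PySem.Int.mod big base
    (if signed && decide (half ≤ v) then v - base else v)
      :: pvBpeel base half signed n (PySem.Int.floordiv big base)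

def parse_delta_frame_ref_samples_alt (data : List Int) (channels : Int) (resolution : Int) (data_type : String) : List Int :=
  let rb : Int := -(PySem.Int.floordiv (-resolution) 8)    -- int(math.ceil(resolution / 8.0))
  if rb ≤ 0 then []
  else
    let count : Int := max 0 (min channels (PySem.Int.floordiv (data.length : Int) rb))
    if count = 0 then []
    else
      let big : Int := pvBigLE (PySem.List.slice data none (some (count * rb)))
      let base : Int := (256:Int) ^ rb.toNat
      let half : Int := PySem.Int.floordiv base 2
      pvBpeel base half (data_type == "signed_int") count.toNat big

-- ===== PRECONDITION & SPEC =====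
-- Pre_ excludes (a) inputs whose consumed byte prefix has an element outside 0..255, on which
-- both programs' int.from_bytes raises ValueError, and (b) non-positive resolution with positive
-- channels, where A's zero/negative slice width yields accidental zero samples while B
-- returns no samples.
def Pre_parse_delta_frame_ref_samples (data : List Int) (channels : Int) (resolution : Int) (data_type : String) : Prop :=
  (1 ≤ resolution ∨ channels ≤ 0) ∧
  (1 ≤ resolution →
    ∀ x ∈ data.take ((-(PySem.Int.floordiv (-resolution) 8) *
        min channels (PySem.Int.floordiv (data.length : Int) (-(PySem.Int.floordiv (-resolution) 8)))).toNat),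
      0 ≤ x ∧ x < 256)
instance (data : List Int) (channels : Int) (resolution : Int) (data_type : String) : Decidable (Pre_parse_delta_frame_ref_samples data channels resolution data_type) := by unfold Pre_parse_delta_frame_ref_samples; infer_instance

def pvWitness_parse_delta_frame_ref_samples : List Int × Int × Int × String := ([1, 255], 1, 16, "signed_int")

def Spec_parse_delta_frame_ref_samples (data : List Int) (channels : Int) (resolution : Int) (data_type : String) (out : List Int) : Prop := out = parse_delta_frame_ref_samples_alt data channels resolution data_type
instance (data : List Int) (channels : Int) (resolution : Int) (data_type : String) (out : List Int) : Decidable (Spec_parse_delta_frame_ref_samples data channels resolution data_type out) := by unfold Spec_parse_delta_frame_ref_samples; infer_instance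

-- ===== CLAIM (what is proved, stated in full; the proofs are below) =====
def Claim_equal_parse_delta_frame_ref_samples : Prop := ∀ (data : List Int) (channels : Int) (resolution : Int) (data_type : String), Dom_parse_delta_frame_ref_samples data channels resolution data_type → Pre_parse_delta_frame_ref_samples data channels resolution data_type → Spec_parse_delta_frame_ref_samples data channels resolution data_type (parse_delta_frame_ref_samples data channels resolution data_type)

-- ===== LEMMAS AND PROOFS =====

-- A's per-iteration sample equals the merged-branch form.
theorem pv_sample_branch (chunk : List Int) (dt : String) :
    (if dt == "signed_int" then pvFromBytesLE chunk true else pvFromBytesLE chunk false)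
      = pvFromBytesLE chunk (dt == "signed_int") := by
  cases dt == "signed_int" <;> simp

-- A's loop characterisation: starting at offset j*rb, A's loop emits exactly
-- min fuel (len/rb - j) consecutive chunks.
theorem pvAloop_eq (data : List Int) (rbn : Nat) (hrb : 0 < rbn) (dt : String) :
    ∀ (fuel j : Nat),
      pvAloop data (rbn : Int) dt fuel ((j : Int) * rbn)
        = (List.range' j (min fuel (data.length / rbn - j))).map (fun k : Nat =>
            pvFromBytesLE (PySem.List.slice data (some ((k : Int) * rbn)) (some ((k : Int) * rbn + rbn)))
              (dt == "signed_int")) := by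
  intro fuel
  induction fuel with
  | zero => intro j; simp [pvAloop]
  | succ fuel ih =>
    intro j
    by_cases hj : j < data.length / rbn
    · have hle : (j + 1) * rbn ≤ data.length := (Nat.le_div_iff_mul_le hrb).1 hj
      have hcond : ¬ ((data.length : Int) < (j : Int) * rbn + rbn) := by
        have := hle; push_cast at this; nlinarith [this]
      have hmin : min (fuel + 1) (data.length / rbn - j)
          = min fuel (data.length / rbn - (j + 1)) + 1 := by omega
      rw [pvAloop, if_neg hcond, pv_sample_branch, hmin, List.range'_succ, List.map_cons,
        show (j : Int) * rbn + rbn = ((j + 1 : Nat) : Int) * rbn by push_cast; ring,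
        ih (j + 1)]
    · have hlt : data.length < (j + 1) * rbn := by
        rcases Nat.lt_or_ge data.length ((j + 1) * rbn) with h | h
        · exact h
        · exact absurd ((Nat.le_div_iff_mul_le hrb).2 h) (by omega)
      have hcond : (data.length : Int) < (j : Int) * rbn + rbn := by
        have := hlt; push_cast at this; nlinarith [this]
      have hmin : min (fuel + 1) (data.length / rbn - j) = 0 := by omega
      rw [pvAloop, if_pos hcond, hmin]
      simp

theorem pvBigLE_append (a b : List Int) :
    pvBigLE (a ++ b) = pvBigLE a + (256:Int) ^ a.length * pvBigLE b := by
  induction a with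
  | nil => simp [pvBigLE]
  | cons x xs ih => simp [pvBigLE, List.foldr] at ih ⊢; rw [ih]; ring

theorem pvBigLE_bounds (l : List Int) (h : ∀ x ∈ l, 0 ≤ x ∧ x < 256) :
    0 ≤ pvBigLE l ∧ pvBigLE l < (256:Int) ^ l.length := by
  induction l with
  | nil => simp [pvBigLE]
  | cons x xs ih =>
    obtain ⟨hx0, hx1⟩ := h x (List.mem_cons_self ..)
    obtain ⟨h0, h1⟩ := ih (fun y hy => h y (List.mem_cons_of_mem _ hy))
    simp only [pvBigLE, List.foldr] at h0 h1 ⊢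
    constructor
    · positivity
    · calc x + 256 * List.foldr (fun b acc => b + 256 * acc) 0 xs
            < 256 + 256 * List.foldr (fun b acc => b + 256 * acc) 0 xs := by omega
        _ ≤ 256 * (256:Int) ^ xs.length := by nlinarith [h1, h0]
        _ = (256:Int) ^ (x :: xs).length := by rw [List.length_cons, pow_succ]; ring

-- the peel loop over the big integer of a bytes prefix produces exactly the chunkwise samples
theorem pvBpeel_eq (rbn : Nat) (hrb : 0 < rbn) (s : Bool) :
    ∀ (n : Nat) (p : List Int), p.length = n * rbn → (∀ x ∈ p, 0 ≤ x ∧ x < 256) →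
      pvBpeel ((256:Int) ^ rbn) (PySem.Int.floordiv ((256:Int) ^ rbn) 2) s n (pvBigLE p)
        = (List.range n).map (fun k => pvFromBytesLE ((p.drop (k * rbn)).take rbn) s) := by
  intro n
  induction n with
  | zero =>
    intro p hlen _; simp [pvBpeel]
  | succ n ih =>
    intro p hlen hbd
    have hc : p = p.take rbn ++ p.drop rbn := (List.take_append_drop rbn p).symm
    have hmul : (n + 1) * rbn = n * rbn + rbn := by ring
    have hclen : (p.take rbn).length = rbn := by
      rw [List.length_take]; omega
    have hdlen : (p.drop rbn).length = n * rbn := by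
      rw [List.length_drop]; omega
    set u := pvBigLE (p.take rbn) with hu
    set r := pvBigLE (p.drop rbn) with hr
    have hbig : pvBigLE p = u + (256:Int) ^ rbn * r := by
      conv_lhs => rw [hc]
      rw [pvBigLE_append, hclen]
    obtain ⟨hu0, hu1⟩ := pvBigLE_bounds (p.take rbn)
      (fun x hx => hbd x (List.mem_of_mem_take hx))
    rw [hclen] at hu1
    obtain ⟨hr0, _⟩ := pvBigLE_bounds (p.drop rbn)
      (fun x hx => hbd x (List.mem_of_mem_drop hx))
    have hbpos : (0:Int) < (256:Int) ^ rbn := by positivity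
    -- 256^rbn is even (rbn ≥ 1), so half = 256^rbn / 2 exactly
    obtain ⟨m, hm⟩ : ∃ m : Nat, rbn = m + 1 := ⟨rbn - 1, by omega⟩
    have heven : (256:Int) ^ rbn = 2 * (128 * (256:Int) ^ m) := by
      rw [hm, pow_succ]; ring
    have hhalf : PySem.Int.floordiv ((256:Int) ^ rbn) 2 = 128 * (256:Int) ^ m := by
      rw [PySem.Int.floordiv_eq_ediv_of_pos (by norm_num), heven]
      omega
    have hmod : PySem.Int.mod (pvBigLE p) ((256:Int) ^ rbn) = u := by
      rw [PySem.Int.mod_eq_emod_of_pos hbpos, hbig]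
      rw [Int.add_mul_emod_self_left]
      exact Int.emod_eq_of_lt hu0 hu1
    have hdiv : PySem.Int.floordiv (pvBigLE p) ((256:Int) ^ rbn) = r := by
      rw [PySem.Int.floordiv_eq_ediv_of_pos hbpos, hbig]
      rw [show u + (256:Int) ^ rbn * r = u + r * 256 ^ rbn by ring]
      rw [Int.add_mul_ediv_right _ _ (by positivity : ((256:Int) ^ rbn) ≠ 0)]
      rw [Int.ediv_eq_zero_of_lt hu0 hu1]; omega
    have hhead : (if s && decide (PySem.Int.floordiv ((256:Int) ^ rbn) 2
          ≤ PySem.Int.mod (pvBigLE p) ((256:Int) ^ rbn))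
        then PySem.Int.mod (pvBigLE p) ((256:Int) ^ rbn) - (256:Int) ^ rbn
        else PySem.Int.mod (pvBigLE p) ((256:Int) ^ rbn))
        = pvFromBytesLE (p.take rbn) s := by
      rw [hmod, hhalf, pvFromBytesLE, hclen]
      have : (decide (128 * (256:Int) ^ m ≤ u)) = (decide ((256:Int) ^ rbn ≤ 2 * u)) := by
        simp only [decide_eq_decide, heven]; omega
      rw [this]; rfl
    rw [pvBpeel, hhead, hdiv, hr,
      ih (p.drop rbn) hdlen (fun x hx => hbd x (List.mem_of_mem_drop hx)),
      List.range_succ_eq_map, List.map_cons, List.map_map]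
    congr 1
    · simp
    · apply List.map_congr_left
      intro k _
      simp only [Function.comp]
      have hx : rbn + k * rbn = k.succ * rbn := by rw [Nat.succ_mul]; omega
      rw [List.drop_drop, hx]

-- ===== VERDICT (by name: the statement is the Claim_ definition above) =====
theorem parse_delta_frame_ref_samples_spec : Claim_equal_parse_delta_frame_ref_samples := by
  intro data channels resolution data_type _hdom hpre
  unfold Spec_parse_delta_frame_ref_samples
  simp only [parse_delta_frame_ref_samples, parse_delta_frame_ref_samples_alt]
  obtain ⟨hres, hbytes⟩ := hpre
  by_cases h1 : 1 ≤ resolution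
  · -- rb = ceil(resolution/8) is a positive integer
    obtain ⟨hb1, hb2⟩ := (PySem.Int.neg_floordiv_neg_eq_iff_of_pos (a := resolution) (b := 8)
      (q := -(PySem.Int.floordiv (-resolution) 8)) (by norm_num)).1 rfl
    have hrbpos : 0 < -(PySem.Int.floordiv (-resolution) 8) := by omega
    obtain ⟨rbn, hrbn, hrbn0⟩ : ∃ rbn : Nat,
        -(PySem.Int.floordiv (-resolution) 8) = (rbn : Int) ∧ 0 < rbn :=
      ⟨(-(PySem.Int.floordiv (-resolution) 8)).toNat, by omega, by omega⟩
    rw [hrbn, if_neg (by omega : ¬ ((rbn : Int) ≤ 0))]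
    have hq : PySem.Int.floordiv (data.length : Int) (rbn : Int)
        = ((data.length / rbn : Nat) : Int) := by
      exact_mod_cast PySem.Int.floordiv_natCast data.length rbn
    -- the byte-prefix bound from Pre_, stated with the Nat count
    have hcnt : ∀ t : Nat, ((min channels (t : Int))).toNat = min channels.toNat t := by
      intro t; omega
    set cntN : Nat := min channels.toNat (data.length / rbn) with hcn
    have hc : max 0 (min channels (PySem.Int.floordiv (data.length : Int) (rbn : Int)))
        = (cntN : Int) := by
      rw [hq]
      have := hcnt (data.length / rbn)
      omega
    -- A's side
    have hA := pvAloop_eq data rbn hrbn0 data_type channels.toNat 0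
    simp only [Nat.cast_zero, zero_mul, Nat.sub_zero] at hA
    rw [hA, ← List.range_eq_range']
    have hminfuel : min channels.toNat (data.length / rbn) = cntN := rfl
    rw [hminfuel]
    -- B's side: count.toNat = cntN
    rw [hc]
    by_cases hcz : cntN = 0
    · rw [if_pos (by exact_mod_cast hcz), hcz]
      simp
    rw [if_neg (by exact_mod_cast hcz)]
    simp only [Int.toNat_natCast]
    -- slice data[: count*rb] = take (cntN*rbn)
    have hmulcast : (cntN : Int) * (rbn : Int) = ((cntN * rbn : Nat) : Int) := by push_cast; ring
    rw [hmulcast, PySem.List.slice_to_natCast]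
    -- the prefix bytes are in range (from Pre_)
    have hpre' : ∀ x ∈ data.take (cntN * rbn), 0 ≤ x ∧ x < 256 := by
      intro x hx
      apply hbytes h1 x
      have hkey : ((-(PySem.Int.floordiv (-resolution) 8) *
          min channels (PySem.Int.floordiv (data.length : Int)
            (-(PySem.Int.floordiv (-resolution) 8))))).toNat = cntN * rbn := by
        have hm := hcnt (data.length / rbn)
        rw [hrbn, hq]
        by_cases hpos : 0 ≤ min channels ((data.length / rbn : Nat) : Int)
        · rw [show min channels ((data.length / rbn : Nat) : Int) = (cntN : Int) by omega,
            show (rbn : Int) * (cntN : Int) = ((cntN * rbn : Nat) : Int) by push_cast; ring,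
            Int.toNat_natCast]
        · have h0 : cntN = 0 := by omega
          have hneg : (rbn : Int) * min channels ((data.length / rbn : Nat) : Int) < 0 := by
            apply mul_neg_of_pos_of_neg _ (by omega)
            exact_mod_cast hrbn0
          rw [h0, Nat.zero_mul]
          exact Int.toNat_of_nonpos (le_of_lt hneg)
      rw [hkey]; exact hx
    -- prefix length: cntN ≤ len/rbn so cntN*rbn ≤ len
    have hplen : (data.take (cntN * rbn)).length = cntN * rbn := by
      rw [List.length_take]
      have : cntN ≤ data.length / rbn := by omega
      have := (Nat.le_div_iff_mul_le hrbn0).1 this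
      omega
    rw [pvBpeel_eq rbn hrbn0 (data_type == "signed_int") cntN (data.take (cntN * rbn)) hplen hpre']
    apply List.map_congr_left
    intro k hk
    rw [List.mem_range] at hk
    -- chunk k of the prefix = slice data (k*rbn) (k*rbn+rbn)
    have hslice : PySem.List.slice data (some ((k : Int) * rbn)) (some ((k : Int) * rbn + rbn))
        = (data.drop (k * rbn)).take rbn := by
      rw [show ((k : Int) * rbn) = ((k * rbn : Nat) : Int) by push_cast; ring,
        PySem.List.slice_natCast_add]
    rw [hslice]
    congr 1
    rw [List.drop_take]
    have : rbn ≤ cntN * rbn - k * rbn := by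
      have : k + 1 ≤ cntN := hk
      calc rbn = 1 * rbn := (one_mul rbn).symm
        _ ≤ (cntN - k) * rbn := Nat.mul_le_mul_right rbn (by omega)
        _ = cntN * rbn - k * rbn := by rw [Nat.sub_mul]
    rw [List.take_take, min_eq_left this]
  · -- resolution ≤ 0: Pre_ forces channels ≤ 0 (so A is empty), and rb ≤ 0 (so B is empty)
    have hch : channels ≤ 0 := by tauto
    have hA : channels.toNat = 0 := by omega
    have hfd : PySem.Int.floordiv (-resolution) 8 = (((-resolution).toNat / 8 : Nat) : Int) := by
      conv_lhs => rw [show (-resolution) = (((-resolution).toNat : Nat) : Int) from by omega]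
      exact_mod_cast PySem.Int.floordiv_natCast (-resolution).toNat 8
    rw [hA, if_pos (by omega : -(PySem.Int.floordiv (-resolution) 8) ≤ 0)]
    simp [pvAloop]
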